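-- pv_equiv track=rewrite | github.com/frnsys/geiger | geiger/text.py | html_decode
-- ===== SOURCE A (Python) =====
-- def html_decode(s):
--     """
--     Returns the ASCII decoded version of the given HTML string. This does
--     NOT remove normal HTML tags like <p>.
--     from: <http://stackoverflow.com/a/275246/1097920>
--     """
--     for code in (
--             ("'", '&#39;'),
--             ('"', '&quot;'),
--             ('>', '&gt;'),
--             ('<', '&lt;'),
--             ('&', '&amp;')
--         ):
--         s = s.replace(code[1], code[0])
--     return s
-- ===== SOURCE B (Python) =====
-- def html_decode(s):
--     """
--     Returns the ASCII decoded version of the given HTML string. This does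
--     NOT remove normal HTML tags like <p>.
--     Single left-to-right pass: at each ampersand, try the five entity suffixes.
--     """
--     table = (("#39;", "'"), ("quot;", '"'), ("gt;", ">"), ("lt;", "<"), ("amp;", "&"))
--     out = []
--     i = 0
--     n = len(s)
--     while i < n:
--         c = s[i]
--         if c == '&':
--             for suf, ch in table:
--                 if s.startswith(suf, i + 1):
--                     out.append(ch)
--                     i += 1 + len(suf)
--                     break
--             else:
--                 out.append(c)
--                 i += 1
--         else:
--             out.append(c)
--             i += 1
--     return ''.join(out)
-- ===== Notes on version B (the rewrite author's own statement) =====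
-- stated objective: alternative
-- what changed: Replaces the five sequential whole-string str.replace passes with a single left-to-right scan that, at each ampersand, matches one of the five entity suffixes and emits its character; since no decoded character re-creates an entity before its own pass, one pass reproduces the sequential replaces exactly.
import Mathlib
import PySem

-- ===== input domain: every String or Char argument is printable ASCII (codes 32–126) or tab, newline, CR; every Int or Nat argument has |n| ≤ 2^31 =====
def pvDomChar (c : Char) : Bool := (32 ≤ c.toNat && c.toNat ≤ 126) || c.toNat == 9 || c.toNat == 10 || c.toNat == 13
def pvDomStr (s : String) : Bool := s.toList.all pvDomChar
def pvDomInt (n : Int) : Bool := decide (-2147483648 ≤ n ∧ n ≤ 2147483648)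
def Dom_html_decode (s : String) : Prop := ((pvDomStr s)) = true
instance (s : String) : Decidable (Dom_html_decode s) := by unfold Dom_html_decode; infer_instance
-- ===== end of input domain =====

-- B decodes the five entities in ONE left-to-right pass instead of A's five sequential
-- whole-string replaces; the return values agree on every string (proved below).

-- ===== PORT A =====
-- A: five sequential s.replace(entity, char) passes, in A's order.
def html_decode (s : String) : String :=
  let s1 := PySem.Str.replace s "&#39;" "'"
  let s2 := PySem.Str.replace s1 "&quot;" "\""
  let s3 := PySem.Str.replace s2 "&gt;" ">"
  let s4 := PySem.Str.replace s3 "&lt;" "<"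
  PySem.Str.replace s4 "&amp;" "&"

-- ===== PORT B =====
-- B's while loop over the index i, ported as recursion on the remaining characters:
-- at an ampersand, try the five entity suffixes in B's table order
-- (s.startswith(suf, i+1) = isPrefixOf on the tail), else copy the character.
def html_decode_alt_core (cs : List Char) : List Char :=
  match cs with
  | [] => []
  | c :: t =>
    if c = '&' then
      if List.isPrefixOf ['#','3','9',';'] t then '\'' :: html_decode_alt_core (t.drop 4)
      else if List.isPrefixOf ['q','u','o','t',';'] t then '"' :: html_decode_alt_core (t.drop 5)
      else if List.isPrefixOf ['g','t',';'] t then '>' :: html_decode_alt_core (t.drop 3)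
      else if List.isPrefixOf ['l','t',';'] t then '<' :: html_decode_alt_core (t.drop 3)
      else if List.isPrefixOf ['a','m','p',';'] t then '&' :: html_decode_alt_core (t.drop 4)
      else c :: html_decode_alt_core t
    else c :: html_decode_alt_core t
termination_by cs.length
decreasing_by all_goals (simp only [List.length_drop, List.length_cons]; omega)


def html_decode_alt (s : String) : String := String.ofList (html_decode_alt_core s.toList)

-- ===== PRECONDITION & SPEC =====
def Spec_html_decode (s : String) (out : String) : Prop := out = html_decode_alt s
instance (s : String) (out : String) : Decidable (Spec_html_decode s out) := by unfold Spec_html_decode; infer_instance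

-- ===== CLAIM (what is proved, stated in full; the proofs are below) =====
def Claim_equal_html_decode : Prop := ∀ (s : String), Dom_html_decode s → Spec_html_decode s (html_decode s)

-- ===== LEMMAS AND PROOFS =====

-- Characterisation of PySem.Chars.replace: accumulator and fuel elimination,
-- then one-step match / no-match equations.

theorem rep_go_acc (old new : List Char) (fuel : Nat) (l acc : List Char) :
    PySem.Chars.replace.go old new fuel l acc
      = acc.reverse ++ PySem.Chars.replace.go old new fuel l [] := by
  induction fuel generalizing l acc with
  | zero => simp [PySem.Chars.replace.go]
  | succ f ih =>
    cases l with
    | nil => simp [PySem.Chars.replace.go]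
    | cons c t =>
      simp only [PySem.Chars.replace.go]
      by_cases h : old.isPrefixOf (c :: t)
      · simp only [h, if_pos]
        rw [ih (List.drop old.length (c :: t)) (new.reverse ++ acc),
            ih (List.drop old.length (c :: t)) (new.reverse ++ [])]
        simp
      · simp only [h, Bool.false_eq_true, if_false]
        rw [ih t [c], ih t (c :: acc)]
        simp

theorem rep_go_fuel (old new : List Char) (hold : old ≠ []) :
    ∀ fuel l, l.length ≤ fuel →
      PySem.Chars.replace.go old new fuel l [] = PySem.Chars.replace.go old new l.length l [] := by
  intro fuel
  induction fuel using Nat.strong_induction_on with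
  | _ fuel ih =>
  intro l hl
  cases l with
  | nil => cases fuel <;> simp [PySem.Chars.replace.go]
  | cons c t =>
    cases fuel with
    | zero => simp at hl
    | succ f =>
      have h1 : 1 ≤ old.length := by cases old <;> simp_all
      have ht : t.length ≤ f := by simpa using hl
      simp only [PySem.Chars.replace.go, List.length_cons]
      by_cases h : old.isPrefixOf (c :: t)
      · simp only [h, if_pos]
        rw [rep_go_acc _ _ f, rep_go_acc _ _ t.length]
        have hdl : (List.drop old.length (c :: t)).length ≤ f := by
          simp only [List.length_drop, List.length_cons]; omega
        have hdl2 : (List.drop old.length (c :: t)).length ≤ t.length := by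
          simp only [List.length_drop, List.length_cons]; omega
        rw [ih f (by omega) _ hdl, ih t.length (by omega) _ hdl2]
      · simp only [h, Bool.false_eq_true, if_false]
        rw [rep_go_acc _ _ f, rep_go_acc _ _ t.length, ih f (by omega) t ht,
          ih t.length (by omega) t le_rfl]

theorem rep_nil (old new : List Char) (hold : old ≠ []) :
    PySem.Chars.replace [] old new = [] := by
  have hE : old.isEmpty = false := by cases old <;> simp_all
  simp [PySem.Chars.replace, hE, PySem.Chars.replace.go]

theorem rep_step_nomatch (c : Char) (cs old new : List Char)
    (h : ¬ old <+: (c :: cs)) :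
    PySem.Chars.replace (c :: cs) old new = c :: PySem.Chars.replace cs old new := by
  have hold : old ≠ [] := by rintro rfl; exact h List.nil_prefix
  have hE : old.isEmpty = false := by cases old <;> simp_all
  have hP : old.isPrefixOf (c :: cs) = false := by
    rw [Bool.eq_false_iff]; intro hc; exact h (List.isPrefixOf_iff_prefix.mp hc)
  simp only [PySem.Chars.replace, hE, Bool.false_eq_true, if_false]
  simp only [List.length_cons, PySem.Chars.replace.go, hP, Bool.false_eq_true, if_false]
  rw [rep_go_acc]
  simp

theorem rep_step_match (rest old new : List Char) (hold : old ≠ []) :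
    PySem.Chars.replace (old ++ rest) old new = new ++ PySem.Chars.replace rest old new := by
  have hE : old.isEmpty = false := by cases old <;> simp_all
  have h1 : 1 ≤ old.length := by cases old <;> simp_all
  simp only [PySem.Chars.replace, hE, Bool.false_eq_true, if_false]
  have hP : old.isPrefixOf (old ++ rest) = true :=
    List.isPrefixOf_iff_prefix.mpr (List.prefix_append _ _)
  have hlen : (old ++ rest).length = (old.length - 1 + rest.length) + 1 := by
    simp only [List.length_append]; omega
  rw [hlen]
  cases hcase : (old ++ rest) with
  | nil => exfalso; cases old <;> simp_all
  | cons c t =>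
    simp only [PySem.Chars.replace.go, ← hcase, hP, if_pos]
    have hdrop : List.drop old.length (old ++ rest) = rest := by
      rw [List.drop_append_of_le_length le_rfl]
      simp
    rw [hdrop, rep_go_acc]
    simp only [List.reverse_reverse, List.append_nil]
    congr 1
    exact rep_go_fuel old new hold _ rest (by omega)

theorem rep_peel (c : Char) (cs o new : List Char) (hc : c ≠ '&') :
    PySem.Chars.replace (c :: cs) ('&' :: o) new = c :: PySem.Chars.replace cs ('&' :: o) new := by
  apply rep_step_nomatch
  rw [List.cons_prefix_cons]
  rintro ⟨h, -⟩; exact hc h.symm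

theorem rep_amp_head (p new X : List Char) (h : ¬ p <+: X) :
    PySem.Chars.replace ('&' :: X) ('&' :: p) new = '&' :: PySem.Chars.replace X ('&' :: p) new := by
  apply rep_step_nomatch
  rw [List.cons_prefix_cons]
  rintro ⟨-, hp⟩; exact h hp

theorem rep_skip (o new : List Char) :
    ∀ q, '&' ∉ q → ∀ rest, PySem.Chars.replace (q ++ rest) ('&' :: o) new
      = q ++ PySem.Chars.replace rest ('&' :: o) new := by
  intro q
  induction q with
  | nil => intro _ rest; simp
  | cons c q ih =>
    intro hq rest
    have hc : c ≠ '&' := fun h => hq (by simp [h])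
    rw [List.cons_append, rep_peel c _ o new hc, ih (fun h => hq (by simp [h])) rest,
      List.cons_append]

theorem rep_prefix_iff (o : List Char) (r : Char) :
    ∀ q, '&' ∉ q → r ∉ q → ∀ cs,
      (q <+: PySem.Chars.replace cs ('&' :: o) [r] ↔ q <+: cs) := by
  intro q
  induction q with
  | nil => intro _ _ cs; simp
  | cons a q' ih =>
    intro hq hr cs
    have ha : a ≠ '&' := fun h => hq (by simp [h])
    have har : a ≠ r := fun h => hr (by simp [h])
    by_cases hm : ('&' :: o) <+: cs
    · obtain ⟨rest, rfl⟩ := hm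
      rw [rep_step_match rest ('&' :: o) [r] (by simp)]
      constructor
      · intro h
        rw [List.singleton_append, List.cons_prefix_cons] at h
        exact absurd h.1 har
      · intro h
        rw [List.cons_append, List.cons_prefix_cons] at h
        exact absurd h.1 ha
    · cases cs with
      | nil => rw [rep_nil _ _ (by simp)]
      | cons c t =>
        rw [rep_step_nomatch c t _ _ hm, List.cons_prefix_cons, List.cons_prefix_cons]
        have hq' : '&' ∉ q' := fun h => hq (by simp [h])
        have hr' : r ∉ q' := fun h => hr (by simp [h])
        constructor
        · rintro ⟨rfl, h2⟩; exact ⟨rfl, (ih hq' hr' t).mp h2⟩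
        · rintro ⟨rfl, h2⟩; exact ⟨rfl, (ih hq' hr' t).mpr h2⟩

def repApos (cs : List Char) : List Char := PySem.Chars.replace cs ['&','#','3','9',';'] ['\'']
def repQuot (cs : List Char) : List Char := PySem.Chars.replace cs ['&','q','u','o','t',';'] ['"']
def repGt (cs : List Char) : List Char := PySem.Chars.replace cs ['&','g','t',';'] ['>']
def repLt (cs : List Char) : List Char := PySem.Chars.replace cs ['&','l','t',';'] ['<']
def repAmp (cs : List Char) : List Char := PySem.Chars.replace cs ['&','a','m','p',';'] ['&']

def composed (cs : List Char) : List Char := repAmp (repLt (repGt (repQuot (repApos cs))))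

theorem composed_nil : composed [] = [] := by
  simp [composed, repApos, repQuot, repGt, repLt, repAmp, rep_nil]

theorem composed_peel (c : Char) (hc : c ≠ '&') (cs : List Char) :
    composed (c :: cs) = c :: composed cs := by
  simp only [composed, repApos, repQuot, repGt, repLt, repAmp]
  rw [rep_peel c _ _ _ hc, rep_peel c _ _ _ hc, rep_peel c _ _ _ hc,
    rep_peel c _ _ _ hc, rep_peel c _ _ _ hc]

theorem comp_case1 (rest : List Char) :
    composed ('&'::'#'::'3'::'9'::';'::rest) = '\'' :: composed rest := by
  simp only [composed, repApos, repQuot, repGt, repLt, repAmp]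
  rw [show PySem.Chars.replace ('&'::'#'::'3'::'9'::';'::rest) ['&','#','3','9',';'] ['\'']
        = '\'' :: PySem.Chars.replace rest ['&','#','3','9',';'] ['\''] from by
      simpa using rep_step_match rest ['&','#','3','9',';'] ['\''] (by simp)]
  rw [rep_peel _ _ _ _ (by decide), rep_peel _ _ _ _ (by decide),
    rep_peel _ _ _ _ (by decide), rep_peel _ _ _ _ (by decide)]

theorem comp_case2 (rest : List Char) :
    composed ('&'::'q'::'u'::'o'::'t'::';'::rest) = '"' :: composed rest := by
  simp only [composed, repApos, repQuot, repGt, repLt, repAmp]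
  rw [rep_amp_head _ _ _ (by rw [List.cons_prefix_cons]; rintro ⟨h, -⟩; exact absurd h (by decide))]
  rw [show PySem.Chars.replace ('q'::'u'::'o'::'t'::';'::rest) ['&','#','3','9',';'] ['\'']
        = 'q'::'u'::'o'::'t'::';'::PySem.Chars.replace rest ['&','#','3','9',';'] ['\''] from by
      simpa using rep_skip ['#','3','9',';'] ['\''] ['q','u','o','t',';'] (by decide) rest]
  rw [show ∀ X : List Char, PySem.Chars.replace ('&'::'q'::'u'::'o'::'t'::';'::X) ['&','q','u','o','t',';'] ['"']
        = '"' :: PySem.Chars.replace X ['&','q','u','o','t',';'] ['"'] from fun X => by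
      simpa using rep_step_match X ['&','q','u','o','t',';'] ['"'] (by simp)]
  rw [rep_peel _ _ _ _ (by decide), rep_peel _ _ _ _ (by decide), rep_peel _ _ _ _ (by decide)]

theorem comp_case3 (rest : List Char) :
    composed ('&'::'g'::'t'::';'::rest) = '>' :: composed rest := by
  simp only [composed, repApos, repQuot, repGt, repLt, repAmp]
  rw [rep_amp_head _ _ _ (by rw [List.cons_prefix_cons]; rintro ⟨h, -⟩; exact absurd h (by decide))]
  rw [show PySem.Chars.replace ('g'::'t'::';'::rest) ['&','#','3','9',';'] ['\'']
        = 'g'::'t'::';'::PySem.Chars.replace rest ['&','#','3','9',';'] ['\''] from by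
      simpa using rep_skip ['#','3','9',';'] ['\''] ['g','t',';'] (by decide) rest]
  rw [rep_amp_head _ _ _ (by rw [List.cons_prefix_cons]; rintro ⟨h, -⟩; exact absurd h (by decide))]
  rw [show ∀ X : List Char, PySem.Chars.replace ('g'::'t'::';'::X) ['&','q','u','o','t',';'] ['"']
        = 'g'::'t'::';'::PySem.Chars.replace X ['&','q','u','o','t',';'] ['"'] from fun X => by
      simpa using rep_skip ['q','u','o','t',';'] ['"'] ['g','t',';'] (by decide) X]
  rw [show ∀ X : List Char, PySem.Chars.replace ('&'::'g'::'t'::';'::X) ['&','g','t',';'] ['>']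
        = '>' :: PySem.Chars.replace X ['&','g','t',';'] ['>'] from fun X => by
      simpa using rep_step_match X ['&','g','t',';'] ['>'] (by simp)]
  rw [rep_peel _ _ _ _ (by decide), rep_peel _ _ _ _ (by decide)]

theorem comp_case4 (rest : List Char) :
    composed ('&'::'l'::'t'::';'::rest) = '<' :: composed rest := by
  simp only [composed, repApos, repQuot, repGt, repLt, repAmp]
  rw [rep_amp_head _ _ _ (by rw [List.cons_prefix_cons]; rintro ⟨h, -⟩; exact absurd h (by decide))]
  rw [show PySem.Chars.replace ('l'::'t'::';'::rest) ['&','#','3','9',';'] ['\'']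
        = 'l'::'t'::';'::PySem.Chars.replace rest ['&','#','3','9',';'] ['\''] from by
      simpa using rep_skip ['#','3','9',';'] ['\''] ['l','t',';'] (by decide) rest]
  rw [rep_amp_head _ _ _ (by rw [List.cons_prefix_cons]; rintro ⟨h, -⟩; exact absurd h (by decide))]
  rw [show ∀ X : List Char, PySem.Chars.replace ('l'::'t'::';'::X) ['&','q','u','o','t',';'] ['"']
        = 'l'::'t'::';'::PySem.Chars.replace X ['&','q','u','o','t',';'] ['"'] from fun X => by
      simpa using rep_skip ['q','u','o','t',';'] ['"'] ['l','t',';'] (by decide) X]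
  rw [rep_amp_head _ _ _ (by rw [List.cons_prefix_cons]; rintro ⟨h, -⟩; exact absurd h (by decide))]
  rw [show ∀ X : List Char, PySem.Chars.replace ('l'::'t'::';'::X) ['&','g','t',';'] ['>']
        = 'l'::'t'::';'::PySem.Chars.replace X ['&','g','t',';'] ['>'] from fun X => by
      simpa using rep_skip ['g','t',';'] ['>'] ['l','t',';'] (by decide) X]
  rw [show ∀ X : List Char, PySem.Chars.replace ('&'::'l'::'t'::';'::X) ['&','l','t',';'] ['<']
        = '<' :: PySem.Chars.replace X ['&','l','t',';'] ['<'] from fun X => by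
      simpa using rep_step_match X ['&','l','t',';'] ['<'] (by simp)]
  rw [rep_peel _ _ _ _ (by decide)]

theorem comp_case5 (rest : List Char) :
    composed ('&'::'a'::'m'::'p'::';'::rest) = '&' :: composed rest := by
  simp only [composed, repApos, repQuot, repGt, repLt, repAmp]
  rw [rep_amp_head _ _ _ (by rw [List.cons_prefix_cons]; rintro ⟨h, -⟩; exact absurd h (by decide))]
  rw [show PySem.Chars.replace ('a'::'m'::'p'::';'::rest) ['&','#','3','9',';'] ['\'']
        = 'a'::'m'::'p'::';'::PySem.Chars.replace rest ['&','#','3','9',';'] ['\''] from by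
      simpa using rep_skip ['#','3','9',';'] ['\''] ['a','m','p',';'] (by decide) rest]
  rw [rep_amp_head _ _ _ (by rw [List.cons_prefix_cons]; rintro ⟨h, -⟩; exact absurd h (by decide))]
  rw [show ∀ X : List Char, PySem.Chars.replace ('a'::'m'::'p'::';'::X) ['&','q','u','o','t',';'] ['"']
        = 'a'::'m'::'p'::';'::PySem.Chars.replace X ['&','q','u','o','t',';'] ['"'] from fun X => by
      simpa using rep_skip ['q','u','o','t',';'] ['"'] ['a','m','p',';'] (by decide) X]
  rw [rep_amp_head _ _ _ (by rw [List.cons_prefix_cons]; rintro ⟨h, -⟩; exact absurd h (by decide))]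
  rw [show ∀ X : List Char, PySem.Chars.replace ('a'::'m'::'p'::';'::X) ['&','g','t',';'] ['>']
        = 'a'::'m'::'p'::';'::PySem.Chars.replace X ['&','g','t',';'] ['>'] from fun X => by
      simpa using rep_skip ['g','t',';'] ['>'] ['a','m','p',';'] (by decide) X]
  rw [rep_amp_head _ _ _ (by rw [List.cons_prefix_cons]; rintro ⟨h, -⟩; exact absurd h (by decide))]
  rw [show ∀ X : List Char, PySem.Chars.replace ('a'::'m'::'p'::';'::X) ['&','l','t',';'] ['<']
        = 'a'::'m'::'p'::';'::PySem.Chars.replace X ['&','l','t',';'] ['<'] from fun X => by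
      simpa using rep_skip ['l','t',';'] ['<'] ['a','m','p',';'] (by decide) X]
  rw [show ∀ X : List Char, PySem.Chars.replace ('&'::'a'::'m'::'p'::';'::X) ['&','a','m','p',';'] ['&']
        = '&' :: PySem.Chars.replace X ['&','a','m','p',';'] ['&'] from fun X => by
      simpa using rep_step_match X ['&','a','m','p',';'] ['&'] (by simp)]

theorem comp_caseNone (t : List Char)
    (h1 : ¬ ['#','3','9',';'] <+: t) (h2 : ¬ ['q','u','o','t',';'] <+: t)
    (h3 : ¬ ['g','t',';'] <+: t) (h4 : ¬ ['l','t',';'] <+: t)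
    (h5 : ¬ ['a','m','p',';'] <+: t) :
    composed ('&' :: t) = '&' :: composed t := by
  simp only [composed, repApos, repQuot, repGt, repLt, repAmp]
  have n2 : ¬ ['q','u','o','t',';'] <+: PySem.Chars.replace t ['&','#','3','9',';'] ['\''] :=
    fun hp => h2 ((rep_prefix_iff ['#','3','9',';'] '\'' _ (by decide) (by decide) t).mp hp)
  have n3 : ¬ ['g','t',';'] <+: PySem.Chars.replace
      (PySem.Chars.replace t ['&','#','3','9',';'] ['\'']) ['&','q','u','o','t',';'] ['"'] :=
    fun hp => h3 ((rep_prefix_iff ['#','3','9',';'] '\'' _ (by decide) (by decide) t).mp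
      ((rep_prefix_iff ['q','u','o','t',';'] '"' _ (by decide) (by decide) _).mp hp))
  have n4 : ¬ ['l','t',';'] <+: PySem.Chars.replace (PySem.Chars.replace
      (PySem.Chars.replace t ['&','#','3','9',';'] ['\'']) ['&','q','u','o','t',';'] ['"'])
      ['&','g','t',';'] ['>'] :=
    fun hp => h4 ((rep_prefix_iff ['#','3','9',';'] '\'' _ (by decide) (by decide) t).mp
      ((rep_prefix_iff ['q','u','o','t',';'] '"' _ (by decide) (by decide) _).mp
        ((rep_prefix_iff ['g','t',';'] '>' _ (by decide) (by decide) _).mp hp)))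
  have n5 : ¬ ['a','m','p',';'] <+: PySem.Chars.replace (PySem.Chars.replace (PySem.Chars.replace
      (PySem.Chars.replace t ['&','#','3','9',';'] ['\'']) ['&','q','u','o','t',';'] ['"'])
      ['&','g','t',';'] ['>']) ['&','l','t',';'] ['<'] :=
    fun hp => h5 ((rep_prefix_iff ['#','3','9',';'] '\'' _ (by decide) (by decide) t).mp
      ((rep_prefix_iff ['q','u','o','t',';'] '"' _ (by decide) (by decide) _).mp
        ((rep_prefix_iff ['g','t',';'] '>' _ (by decide) (by decide) _).mp
          ((rep_prefix_iff ['l','t',';'] '<' _ (by decide) (by decide) _).mp hp))))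
  rw [rep_amp_head _ _ _ h1, rep_amp_head _ _ _ n2, rep_amp_head _ _ _ n3,
    rep_amp_head _ _ _ n4, rep_amp_head _ _ _ n5]

theorem composed_main : ∀ n cs, cs.length ≤ n → composed cs = html_decode_alt_core cs := by
  intro n
  induction n with
  | zero =>
    intro cs h
    have h0 : cs = [] := by cases cs <;> simp_all
    subst h0
    rw [composed_nil, html_decode_alt_core]
  | succ n ih =>
    intro cs hcs
    cases cs with
    | nil => rw [composed_nil, html_decode_alt_core]
    | cons c t =>
      simp only [List.length_cons] at hcs
      rw [html_decode_alt_core]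
      by_cases hc : c = '&'
      case neg =>
        rw [if_neg hc, composed_peel c hc t, ih t (by omega)]
      case pos =>
      subst hc
      rw [if_pos rfl]
      by_cases p1 : ['#','3','9',';'] <+: t
      · obtain ⟨rest, rfl⟩ := p1
        rw [if_pos (List.isPrefixOf_iff_prefix.mpr (List.prefix_append _ _))]
        simp only [List.cons_append, List.nil_append] at hcs ⊢
        rw [comp_case1 rest, List.drop_succ_cons, List.drop_succ_cons, List.drop_succ_cons,
          List.drop_succ_cons, List.drop_zero, ih rest (by simp only [List.length_cons] at hcs; omega)]
      · rw [if_neg (fun hp => p1 (List.isPrefixOf_iff_prefix.mp hp))]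
        by_cases p2 : ['q','u','o','t',';'] <+: t
        · obtain ⟨rest, rfl⟩ := p2
          rw [if_pos (List.isPrefixOf_iff_prefix.mpr (List.prefix_append _ _))]
          simp only [List.cons_append, List.nil_append] at hcs ⊢
          rw [comp_case2 rest, List.drop_succ_cons, List.drop_succ_cons, List.drop_succ_cons,
            List.drop_succ_cons, List.drop_succ_cons, List.drop_zero, ih rest (by simp only [List.length_cons] at hcs; omega)]
        · rw [if_neg (fun hp => p2 (List.isPrefixOf_iff_prefix.mp hp))]
          by_cases p3 : ['g','t',';'] <+: t
          · obtain ⟨rest, rfl⟩ := p3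
            rw [if_pos (List.isPrefixOf_iff_prefix.mpr (List.prefix_append _ _))]
            simp only [List.cons_append, List.nil_append] at hcs ⊢
            rw [comp_case3 rest, List.drop_succ_cons, List.drop_succ_cons, List.drop_succ_cons,
              List.drop_zero, ih rest (by simp only [List.length_cons] at hcs; omega)]
          · rw [if_neg (fun hp => p3 (List.isPrefixOf_iff_prefix.mp hp))]
            by_cases p4 : ['l','t',';'] <+: t
            · obtain ⟨rest, rfl⟩ := p4
              rw [if_pos (List.isPrefixOf_iff_prefix.mpr (List.prefix_append _ _))]
              simp only [List.cons_append, List.nil_append] at hcs ⊢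
              rw [comp_case4 rest, List.drop_succ_cons, List.drop_succ_cons, List.drop_succ_cons,
                List.drop_zero, ih rest (by simp only [List.length_cons] at hcs; omega)]
            · rw [if_neg (fun hp => p4 (List.isPrefixOf_iff_prefix.mp hp))]
              by_cases p5 : ['a','m','p',';'] <+: t
              · obtain ⟨rest, rfl⟩ := p5
                rw [if_pos (List.isPrefixOf_iff_prefix.mpr (List.prefix_append _ _))]
                simp only [List.cons_append, List.nil_append] at hcs ⊢
                rw [comp_case5 rest, List.drop_succ_cons, List.drop_succ_cons,
                  List.drop_succ_cons, List.drop_succ_cons, List.drop_zero, ih rest (by simp only [List.length_cons] at hcs; omega)]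
              · rw [if_neg (fun hp => p5 (List.isPrefixOf_iff_prefix.mp hp))]
                rw [comp_caseNone t p1 p2 p3 p4 p5, ih t (by omega)]


theorem html_decode_toList (s : String) :
    (html_decode s).toList = composed s.toList := by
  simp [html_decode, PySem.Str.toList_replace, composed, repApos, repQuot, repGt, repLt, repAmp]

-- ===== VERDICT (by name: the statement is the Claim_ definition above) =====
theorem html_decode_spec : Claim_equal_html_decode := by
  intro s _
  unfold Spec_html_decode html_decode_alt
  rw [← String.toList_inj, String.toList_ofList, html_decode_toList,
    composed_main s.toList.length s.toList le_rfl]
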